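-- pv_equiv track=rewrite | github.com/woletee/1D_ARC | src/backend/genetic_algorithm.py | padded_fill
-- ===== SOURCE A (Python) =====
-- def padded_fill(input_list):
--     output_list = input_list.copy()
--     start_index = None
--     end_index = None
--     for i, num in enumerate(input_list):
--         if num != 0:
--
--             if start_index is not None:
--                 for j in range(start_index + 1, i):
--                     output_list[j] = input_list[start_index]
--                 start_index = None
--             else:
--                 start_index = i
--     return output_list
-- ===== SOURCE B (Python) =====
-- def padded_fill(input_list):
--     output_list = input_list.copy()
--     markers = [i for i, num in enumerate(input_list) if num != 0]
--     it = iter(markers)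
--     for p0, p1 in zip(it, it):  # consume markers two at a time; trailing unpaired marker is dropped
--         for j in range(p0 + 1, p1):
--             output_list[j] = input_list[p0]
--     return output_list
-- ===== Notes on version B (the rewrite author's own statement) =====
-- stated objective: alternative
-- what changed: B first gathers all non-zero marker indices in one pass, then consumes them two at a time filling between each pair, instead of A's single scan with a toggling start_index state.
import Mathlib
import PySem

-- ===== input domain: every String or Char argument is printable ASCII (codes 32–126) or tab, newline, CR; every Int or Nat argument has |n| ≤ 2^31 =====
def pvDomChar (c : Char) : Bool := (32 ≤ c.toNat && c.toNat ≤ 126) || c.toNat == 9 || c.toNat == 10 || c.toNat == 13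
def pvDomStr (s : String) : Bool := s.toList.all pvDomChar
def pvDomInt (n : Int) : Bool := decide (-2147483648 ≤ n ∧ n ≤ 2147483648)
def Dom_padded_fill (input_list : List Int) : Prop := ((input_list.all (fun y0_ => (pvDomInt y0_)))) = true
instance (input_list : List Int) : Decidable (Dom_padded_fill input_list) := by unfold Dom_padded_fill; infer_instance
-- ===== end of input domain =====

-- B gathers the non-zero marker indices first, then fills between successive pairs;
-- A does one scan toggling a start_index. Same return value; exact equivalence proved below.

-- ===== PORT A =====
-- single scan over enumerate(input_list) with state (output_list, start_index : Option Int);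
-- out[j] = v with 0 ≤ j < len is List.set j.toNat (j is always a valid non-negative index here)
def padded_fill (input_list : List Int) : List Int :=
  (PySem.List.enumerate input_list).foldl
    (fun (st : List Int × Option Int) (p : Int × Int) =>
      if p.2 ≠ 0 then
        match st.2 with
        | some s =>
            ((PySem.List.pyRange (s + 1) p.1 1).foldl
               (fun o j => o.set j.toNat (PySem.List.pyGetD input_list s 0)) st.1,
             none)
        | none => (st.1, some p.1)
      else st)
    (input_list, none)
  |>.1

-- ===== PORT B =====
-- while len(markers) >= 2: fill between markers[0] and markers[1], drop them
def pvFillPairs (input_list : List Int) : List Int → List Int → List Int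
  | p0 :: p1 :: rest, output_list =>
      pvFillPairs input_list rest
        ((PySem.List.pyRange (p0 + 1) p1 1).foldl
           (fun o j => o.set j.toNat (PySem.List.pyGetD input_list p0 0)) output_list)
  | _, output_list => output_list

def padded_fill_alt (input_list : List Int) : List Int :=
  pvFillPairs input_list
    ((PySem.List.enumerate input_list).filterMap
      (fun p => if p.2 ≠ 0 then some p.1 else none))
    input_list

-- ===== PRECONDITION & SPEC =====
def Spec_padded_fill (input_list : List Int) (out : List Int) : Prop := out = padded_fill_alt input_list
instance (input_list : List Int) (out : List Int) : Decidable (Spec_padded_fill input_list out) := by unfold Spec_padded_fill; infer_instance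

-- ===== CLAIM (what is proved, stated in full; the proofs are below) =====
def Claim_equal_padded_fill : Prop := ∀ (input_list : List Int), Dom_padded_fill input_list → Spec_padded_fill input_list (padded_fill input_list)

-- ===== LEMMAS AND PROOFS =====

-- the common inner fill loop
def pvFill (xs : List Int) (s i : Int) (out : List Int) : List Int :=
  (PySem.List.pyRange (s + 1) i 1).foldl
    (fun o j => o.set j.toNat (PySem.List.pyGetD xs s 0)) out

-- main invariant: A's fold from any state equals B's pair-filling on the pending marker list
theorem pvFold_eq_fillPairs (xs : List Int) :
    ∀ (es : List (Int × Int)) (out : List Int) (si : Option Int),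
      ((es.foldl
        (fun (st : List Int × Option Int) (p : Int × Int) =>
          if p.2 ≠ 0 then
            match st.2 with
            | some s => (pvFill xs s p.1 st.1, none)
            | none => (st.1, some p.1)
          else st)
        (out, si)).1)
      = pvFillPairs xs
          ((match si with | some s => [s] | none => []) ++
            es.filterMap (fun p => if p.2 ≠ 0 then some p.1 else none))
          out := by
  intro es
  induction es with
  | nil =>
      intro out si
      cases si <;> simp [pvFillPairs]
  | cons p es ih =>
      intro out si
      by_cases h : p.2 ≠ 0
      · cases si with
        | none =>
            simpa [List.foldl_cons, h] using ih out (some p.1)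
        | some s =>
            simpa [List.foldl_cons, h, pvFillPairs, pvFill] using ih (pvFill xs s p.1 out) none
      · simp at h
        simpa [List.foldl_cons, h] using ih out si

-- ===== VERDICT (by name: the statement is the Claim_ definition above) =====
theorem padded_fill_spec : Claim_equal_padded_fill := by
  intro xs _
  unfold Spec_padded_fill padded_fill padded_fill_alt
  have := pvFold_eq_fillPairs xs (PySem.List.enumerate xs) xs none
  simpa [pvFill] using this
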